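-- pv_equiv track=rewrite | github.com/eser-chr/Polymer_simulations | lib/.ipynb_checkpoints/setup_lib-checkpoint.py | create_combos
-- ===== SOURCE A (Python) =====
-- import itertools
--
-- def indexed_pairs(grid:dict)->list[list]:
--     '''Create all indexed pairs based on a dictionary and return a list of list.
--     Each sublist is the set of all indexed pairs that correspond
--     to a specific key of the dicionary.'''
--
--     catalog = []
--     for key, vals in grid.items():
--         item = [(key,val) for val in vals]
--         catalog.append(item)
--     return catalog
--
-- def create_combos (grid:dict, copies:int)->list[tuple]:
--     ''' Create all the unique combinations from a dict, based on the grid and returnes a list!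
--     Unique in the sense that each combination contains exactly one value of each key   '''
--
--     catalog = indexed_pairs(grid)
--     x = itertools.product(*catalog)
--     x = list(x)
--     r = x.copy()
--     if copies != 1:
--         for i in range(copies - 1):
--             r = [*r,*x]
--
--     return(r)
-- ===== SOURCE B (Python) =====
-- def create_combos(grid: dict, copies: int) -> list:
--     items = list(grid.items())
--     total = 1
--     for _, vals in items:
--         total *= len(vals)
--     combos = []
--     for r in range(total):
--         x = r
--         combo = []
--         for key, vals in reversed(items):
--             x, i = divmod(x, len(vals))
--             combo.append((key, vals[i]))
--         combo.reverse()
--         combos.append(tuple(combo))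
--     reps = copies if copies > 1 else 1
--     return combos * reps
-- ===== Notes on version B (the rewrite author's own statement) =====
-- stated objective: alternative
-- what changed: Replaces indexed_pairs + itertools.product by mixed-radix unranking: B multiplies the value-list lengths to get the product size and decodes each rank r into one combination by repeated divmod, never materialising per-key pair-lists or an incremental product.
import Mathlib
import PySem

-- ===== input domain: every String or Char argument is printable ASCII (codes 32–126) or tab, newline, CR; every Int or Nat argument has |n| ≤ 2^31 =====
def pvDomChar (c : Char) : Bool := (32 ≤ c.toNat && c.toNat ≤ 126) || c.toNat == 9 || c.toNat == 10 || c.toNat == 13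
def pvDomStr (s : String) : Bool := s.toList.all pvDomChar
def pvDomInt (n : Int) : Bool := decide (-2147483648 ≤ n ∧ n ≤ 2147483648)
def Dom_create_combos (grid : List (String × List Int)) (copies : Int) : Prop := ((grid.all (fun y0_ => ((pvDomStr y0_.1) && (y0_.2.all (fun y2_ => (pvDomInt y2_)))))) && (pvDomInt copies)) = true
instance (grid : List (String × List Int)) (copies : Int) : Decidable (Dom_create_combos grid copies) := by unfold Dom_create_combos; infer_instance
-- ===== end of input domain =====

-- B replaces indexed_pairs + itertools.product by mixed-radix unranking: it counts the
-- product size and decodes each rank r into a combination by repeated divmod (alternative decomposition).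


-- ===== PORT A =====
-- helper: the module's indexed_pairs (loop appending one pair-list per key)
def indexed_pairs (grid : List (String × List Int)) : List (List (String × Int)) :=
  grid.foldl (fun catalog kv => catalog ++ [kv.2.map (fun v => (kv.1, v))]) []

-- helper: itertools.product(*catalog) — Cartesian product in lexicographic order
def pyProduct (catalog : List (List (String × Int))) : List (List (String × Int)) :=
  match catalog with
  | [] => [[]]
  | l :: ls => l.flatMap (fun p => (pyProduct ls).map (fun rest => p :: rest))

def create_combos (grid : List (String × List Int)) (copies : Int) : List (List (String × Int)) :=
  let catalog := indexed_pairs grid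
  let x := pyProduct catalog
  let r := x
  if copies ≠ 1 then
    (PySem.List.pyRange 0 (copies - 1) 1).foldl (fun r _ => r ++ x) r
  else r

-- ===== PORT B =====
-- B's inner loop over reversed(items): peel the least-significant mixed-radix digit by divmod.
-- All values stay nonnegative in Python, so Nat division is exact; 'vals[i]' is always in range
-- when the loop runs (total > 0), so the getD default is unreachable.
def unrankLoop (rev : List (String × List Int)) (x : Nat) (combo : List (String × Int)) :
    Nat × List (String × Int) :=
  match rev with
  | [] => (x, combo)
  | (k, vals) :: rest =>
      unrankLoop rest (x / vals.length) (combo ++ [(k, vals.getD (x % vals.length) 0)])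

def create_combos_alt (grid : List (String × List Int)) (copies : Int) : List (List (String × Int)) :=
  let total := grid.foldl (fun t kv => t * kv.2.length) 1
  let combos := (List.range total).map (fun r => ((unrankLoop grid.reverse r []).2).reverse)
  let reps := if copies > 1 then copies.toNat else 1
  (List.replicate reps combos).flatten

-- ===== PRECONDITION & SPEC =====
def Spec_create_combos (grid : List (String × List Int)) (copies : Int) (out : List (List (String × Int))) : Prop := out = create_combos_alt grid copies
instance (grid : List (String × List Int)) (copies : Int) (out : List (List (String × Int))) : Decidable (Spec_create_combos grid copies out) := by unfold Spec_create_combos; infer_instance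

-- ===== CLAIM (what is proved, stated in full; the proofs are below) =====
def Claim_equal_create_combos : Prop := ∀ (grid : List (String × List Int)) (copies : Int), Dom_create_combos grid copies → Spec_create_combos grid copies (create_combos grid copies)

-- ===== LEMMAS AND PROOFS =====

-- A's indexed_pairs is the map of per-key pair-lists
lemma indexed_pairs_eq (grid : List (String × List Int)) :
    indexed_pairs grid = grid.map (fun kv => kv.2.map (fun v => (kv.1, v))) := by
  simpa [indexed_pairs] using
    PySem.List.foldl_append_singleton_eq_map (f := fun kv : String × List Int => kv.2.map (fun v => (kv.1, v))) grid

-- product size of the catalog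
def prodLen (grid : List (String × List Int)) : Nat :=
  grid.foldl (fun t kv => t * kv.2.length) 1

lemma prodLen_append (gs : List (String × List Int)) (kv : String × List Int) :
    prodLen (gs ++ [kv]) = prodLen gs * kv.2.length := by
  simp [prodLen, List.foldl_append]

-- pyProduct with the last group split off: the last component varies fastest
lemma pyProduct_append (cat : List (List (String × Int))) (l : List (String × Int)) :
    pyProduct (cat ++ [l]) = (pyProduct cat).flatMap (fun rest => l.map (fun p => rest ++ [p])) := by
  induction cat with
  | nil =>
      simp only [List.nil_append, pyProduct, List.flatMap_cons, List.flatMap_nil, List.append_nil]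
      induction l <;> simp_all
  | cons g gs ih =>
      simp only [List.cons_append, pyProduct, ih, List.flatMap_assoc, List.map_flatMap]
      congr 1; funext p
      simp [List.flatMap_map, List.map_map, Function.comp_def]

-- the accumulator of unrankLoop only grows by appending
lemma unrankLoop_acc (rev : List (String × List Int)) (x : Nat) (c : List (String × Int)) :
    unrankLoop rev x c = ((unrankLoop rev x []).1, c ++ (unrankLoop rev x []).2) := by
  induction rev generalizing x c with
  | nil => simp [unrankLoop]
  | cons kv rest ih =>
      obtain ⟨k, vals⟩ := kv
      simp only [unrankLoop, List.nil_append]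
      rw [ih (x / vals.length) (c ++ [(k, vals.getD (x % vals.length) 0)]),
          ih (x / vals.length) [(k, vals.getD (x % vals.length) 0)]]
      simp

-- range of a product decomposes into blocks
lemma range_mul_flatMap (n m : Nat) :
    List.range (n * m) = (List.range n).flatMap (fun q => (List.range m).map (fun i => q * m + i)) := by
  induction n with
  | zero => simp
  | succ n ih =>
      have : (n + 1) * m = n * m + m := by ring
      rw [this, List.range_add, ih, List.range_succ]
      simp

-- enumerating a list by index
lemma map_range_getD {α : Type} [Inhabited α] (l : List α) (d : α) :
    (List.range l.length).map (fun i => l.getD i d) = l := by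
  apply List.ext_getElem
  · simp
  · intro i _ h2
    simp only [List.getElem_map, List.getElem_range, List.getD]
    rw [List.getElem?_eq_getElem h2]
    rfl

-- KEY LEMMA: unranking all ranks enumerates the Cartesian product in product order
lemma unrank_eq_pyProduct (grid : List (String × List Int)) :
    (List.range (prodLen grid)).map (fun r => ((unrankLoop grid.reverse r []).2).reverse)
      = pyProduct (indexed_pairs grid) := by
  induction grid using List.reverseRecOn with
  | nil => simp [prodLen, unrankLoop, indexed_pairs, pyProduct]
  | append_singleton gs kv ih =>
      obtain ⟨k, vals⟩ := kv
      rw [prodLen_append, indexed_pairs_eq, List.map_append, ← indexed_pairs_eq]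
      simp only [List.map_cons, List.map_nil]
      rw [pyProduct_append, ← ih]
      rw [range_mul_flatMap, List.map_flatMap, List.flatMap_map]
      congr 1; funext q
      conv_rhs => rw [← map_range_getD vals 0]
      simp only [List.map_map]
      apply List.map_congr_left
      intro i hi
      rw [List.mem_range] at hi
      have hm : 0 < vals.length := by omega
      have hdiv : (q * vals.length + i) / vals.length = q := by
        rw [Nat.mul_comm, Nat.mul_add_div hm, Nat.div_eq_of_lt hi, Nat.add_zero]
      have hmod : (q * vals.length + i) % vals.length = i := by
        rw [Nat.mul_comm, Nat.mul_add_mod, Nat.mod_eq_of_lt hi]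
      have hstep : unrankLoop ((k, vals) :: gs.reverse) (q * vals.length + i) [] =
          unrankLoop gs.reverse q [(k, vals.getD i 0)] := by
        simp only [unrankLoop, List.nil_append, hdiv, hmod]
      simp only [Function.comp_def, List.reverse_append, List.reverse_cons, List.reverse_nil,
        List.nil_append, List.singleton_append]
      rw [hstep, unrankLoop_acc]
      simp [List.getD]

-- A's replication loop, started from a, appends n copies of x
lemma foldl_append_const {α : Type} (l : List Int) (x a : List α) :
    l.foldl (fun r _ => r ++ x) a = a ++ (List.replicate l.length x).flatten := by
  induction l generalizing a with
  | nil => simp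
  | cons b t ih => simp [ih, List.append_assoc, List.replicate_succ]

-- both replication mechanisms yield max(copies,1) copies of x
lemma repl_eq {α : Type} (x : List α) (copies : Int) :
    (PySem.List.pyRange 0 (copies - 1) 1).foldl (fun r _ => r ++ x) x
      = (List.replicate (if copies > 1 then copies.toNat else 1) x).flatten := by
  have hlen : (PySem.List.pyRange 0 (copies - 1) 1).length = (copies - 1).toNat := by
    simp [PySem.List.length_pyRange_one]
  rw [foldl_append_const, hlen]
  by_cases h2 : copies > 1
  · have h3 : copies.toNat = (copies - 1).toNat + 1 := by omega
    rw [if_pos h2, h3, List.replicate_succ, List.flatten_cons]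
  · have h3 : (copies - 1).toNat = 0 := by omega
    rw [if_neg h2, h3]
    simp

theorem create_combos_spec : Claim_equal_create_combos := by
  intro grid copies _
  show create_combos grid copies = create_combos_alt grid copies
  unfold create_combos create_combos_alt
  show (if copies ≠ 1 then
      (PySem.List.pyRange 0 (copies - 1) 1).foldl (fun r _ => r ++ pyProduct (indexed_pairs grid)) (pyProduct (indexed_pairs grid))
    else pyProduct (indexed_pairs grid))
    = (List.replicate (if copies > 1 then copies.toNat else 1)
        ((List.range (prodLen grid)).map (fun r => ((unrankLoop grid.reverse r []).2).reverse))).flatten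
  rw [unrank_eq_pyProduct]
  by_cases h1 : copies = 1
  · simp [h1]
  · rw [if_pos h1, repl_eq]
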